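-- pv_equiv track=rewrite | github.com/Rene7e7/ReneTubiera-asixc1B-m03 | proves/UF3 Recu/A1. Fitxers E_S Exercici Reforç Se debe hacer asi/Exercici de Gestionar/Gestionen números del fitxer/procesar_contenido.py | procesar_contenido
-- ===== SOURCE A (Python) =====
-- def procesar_contenido(contenido):
--     numeros = []
--
--     for caracter in contenido:
--         if caracter.isdigit():
--             numeros.append(caracter)
--
--     # Quiero que cada línea solo tenga 10 números
--     resultado = ""
--     for i in range(0, len(numeros), 10):
--         resultado += " ".join(numeros[i:i+10]) + "\n"
--
--     return resultado
-- ===== SOURCE B (Python) =====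
-- def procesar_contenido(contenido):
--     resultado = ""
--     buffer = []
--     for caracter in contenido:
--         if caracter.isdigit():
--             buffer.append(caracter)
--             if len(buffer) == 10:
--                 resultado += " ".join(buffer) + "\n"
--                 buffer = []
--     if buffer:
--         resultado += " ".join(buffer) + "\n"
--     return resultado
-- ===== Notes on version B (the rewrite author's own statement) =====
-- stated objective: alternative
-- what changed: Replaced A's two-phase collect-all-digits-then-chunk-by-index (range/slice over the collected list) with a single pass over the input that maintains a current-line buffer and flushes a line each time it reaches 10 digits, flushing the partial buffer at the end.
import Mathlib
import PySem

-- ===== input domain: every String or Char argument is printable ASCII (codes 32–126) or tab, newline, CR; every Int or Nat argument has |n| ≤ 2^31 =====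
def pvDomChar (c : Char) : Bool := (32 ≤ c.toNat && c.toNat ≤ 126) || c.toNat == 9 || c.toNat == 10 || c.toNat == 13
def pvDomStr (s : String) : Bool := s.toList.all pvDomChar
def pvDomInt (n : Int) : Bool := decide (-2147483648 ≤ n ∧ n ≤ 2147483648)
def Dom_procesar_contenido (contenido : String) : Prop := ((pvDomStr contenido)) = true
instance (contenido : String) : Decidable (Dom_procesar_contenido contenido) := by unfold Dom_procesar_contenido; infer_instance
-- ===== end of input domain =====

-- B replaces A's two-phase collect-then-chunk-by-index with a single pass that
-- keeps a current-line buffer and flushes it every 10 digits (objective: alternative decomposition).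

-- ===== PORT A =====
def procesar_contenido (contenido : String) : String :=
  let numeros : List Char :=
    contenido.toList.foldl (fun acc c => if PySem.Chars.isdigit c then acc ++ [c] else acc) []
  let resultado : List Char :=
    (PySem.List.pyRange 0 (numeros.length : Int) 10).foldl
      (fun res i =>
        res ++ PySem.Chars.join [' ']
          ((PySem.List.slice numeros (some i) (some (i + 10))).map (fun c => [c])) ++ ['\n'])
      []
  String.ofList resultado

-- ===== PORT B =====
-- " ".join(buf) + "\n"  (helper 'linea'-style expression of Source B)
def pvLine (g : List Char) : List Char :=
  PySem.Chars.join [' '] (g.map (fun c => [c])) ++ ['\n']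

def procesar_contenido_alt (contenido : String) : String :=
  let st :=
    contenido.toList.foldl
      (fun (p : List Char × List Char) c =>
        if PySem.Chars.isdigit c then
          let buf := p.2 ++ [c]
          if buf.length = 10 then (p.1 ++ pvLine buf, ([] : List Char)) else (p.1, buf)
        else p)
      (([], []) : List Char × List Char)
  String.ofList (st.1 ++ (if st.2 = [] then [] else pvLine st.2))

-- ===== PRECONDITION & SPEC =====
def Spec_procesar_contenido (contenido : String) (out : String) : Prop := out = procesar_contenido_alt contenido
instance (contenido : String) (out : String) : Decidable (Spec_procesar_contenido contenido out) := by unfold Spec_procesar_contenido; infer_instance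

-- ===== CLAIM (what is proved, stated in full; the proofs are below) =====
def Claim_equal_procesar_contenido : Prop := ∀ (contenido : String), Dom_procesar_contenido contenido → Spec_procesar_contenido contenido (procesar_contenido contenido)

-- ===== LEMMAS AND PROOFS =====

-- the common description: the digit list cut into lines of 10
def pvChunks (ds : List Char) : List Char :=
  if h : ds = [] then [] else pvLine (ds.take 10) ++ pvChunks (ds.drop 10)
termination_by ds.length
decreasing_by
  have hl : 0 < ds.length := List.length_pos_of_ne_nil h
  simp only [List.length_drop]
  omega

theorem pvChunks_nil : pvChunks [] = [] := by rw [pvChunks.eq_def]; simp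

theorem pvChunks_short (ds : List Char) (h : ds.length ≤ 10) (hne : ds ≠ []) :
    pvChunks ds = pvLine ds := by
  rw [pvChunks.eq_def]
  simp [hne, List.take_of_length_le h, List.drop_eq_nil_of_le h, pvChunks_nil]

theorem pvChunks_full (g ds : List Char) (hg : g.length = 10) :
    pvChunks (g ++ ds) = pvLine g ++ pvChunks ds := by
  rw [pvChunks.eq_def]
  have hne : g ++ ds ≠ [] := by
    intro h; rcases List.append_eq_nil_iff.mp h with ⟨h1, _⟩; simp [h1] at hg
  simp only [hne, dite_false]
  rw [List.take_left' hg, List.drop_left' hg]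

-- step-10 cons unfolding for pyRange
theorem pvRange10_cons (a b : Int) (h : a < b) :
    PySem.List.pyRange a b 10 = a :: PySem.List.pyRange (a + 10) b 10 := by
  rw [PySem.List.pyRange_of_pos a b (by norm_num),
      PySem.List.pyRange_of_pos (a + 10) b (by norm_num)]
  have hcnt : ((b - a + 10 - 1) / 10).toNat
      = (if a + 10 < b then ((b - (a + 10) + 10 - 1) / 10).toNat else 0) + 1 := by
    split_ifs with h2 <;> omega
  rw [if_pos h, hcnt, List.range_succ_eq_map]
  simp only [List.map_cons, List.map_map, Nat.cast_zero, mul_zero, add_zero]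
  refine congrArg _ (List.map_congr_left fun k _ => ?_)
  simp only [Function.comp_apply, Nat.succ_eq_add_one]
  push_cast
  ring

-- A's index loop, started at any index a, produces the chunks of the suffix
theorem pvA_fold (m : Nat) (ds : List Char) (a : Nat) (hm : ds.length - a ≤ m) (res : List Char) :
    (PySem.List.pyRange (a : Int) (ds.length : Int) 10).foldl
      (fun res i =>
        res ++ PySem.Chars.join [' ']
          ((PySem.List.slice ds (some i) (some (i + 10))).map (fun c => [c])) ++ ['\n'])
      res = res ++ pvChunks (ds.drop a) := by
  induction m generalizing a res with
  | zero =>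
    have hle : ds.length ≤ a := by omega
    have hnl : ¬ ((a : Int) < (ds.length : Int)) := by exact_mod_cast Nat.not_lt.mpr hle
    rw [PySem.List.pyRange_of_pos _ _ (by norm_num), if_neg hnl]
    rw [List.drop_eq_nil_of_le hle, pvChunks_nil]
    simp
  | succ m ih =>
    by_cases hlt : a < ds.length
    · rw [pvRange10_cons _ _ (by exact_mod_cast hlt)]
      simp only [List.foldl_cons]
      have hslice : PySem.List.slice ds (some (a : Int)) (some ((a : Int) + 10))
          = (ds.drop a).take 10 := by
        have := PySem.List.slice_natCast_add ds a 10
        simpa using this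
      have hcast : (a : Int) + 10 = ((a + 10 : Nat) : Int) := by push_cast; ring
      rw [hslice, hcast, ih (a + 10) (by omega)]
      conv_rhs => rw [pvChunks.eq_def]
      have hne : ds.drop a ≠ [] := by
        intro h
        have := List.drop_eq_nil_iff.mp h
        omega
      simp only [hne, dite_false, List.drop_drop]
      simp [pvLine, List.append_assoc]
    · have hnl : ¬ ((a : Int) < (ds.length : Int)) := by exact_mod_cast hlt
      rw [PySem.List.pyRange_of_pos _ _ (by norm_num), if_neg hnl]
      rw [List.drop_eq_nil_of_le (by omega), pvChunks_nil]
      simp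

-- B's buffer loop invariant
theorem pvB_fold (cs : List Char) (acc buf : List Char) (hbuf : buf.length < 10) :
    (cs.foldl
        (fun (p : List Char × List Char) c =>
          if PySem.Chars.isdigit c then
            let buf := p.2 ++ [c]
            if buf.length = 10 then (p.1 ++ pvLine buf, ([] : List Char)) else (p.1, buf)
          else p)
        (acc, buf)).1 ++
      (if (cs.foldl
        (fun (p : List Char × List Char) c =>
          if PySem.Chars.isdigit c then
            let buf := p.2 ++ [c]
            if buf.length = 10 then (p.1 ++ pvLine buf, ([] : List Char)) else (p.1, buf)
          else p)
        (acc, buf)).2 = [] then []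
       else pvLine (cs.foldl
        (fun (p : List Char × List Char) c =>
          if PySem.Chars.isdigit c then
            let buf := p.2 ++ [c]
            if buf.length = 10 then (p.1 ++ pvLine buf, ([] : List Char)) else (p.1, buf)
          else p)
        (acc, buf)).2)
    = acc ++ pvChunks (buf ++ cs.filter PySem.Chars.isdigit) := by
  induction cs generalizing acc buf with
  | nil =>
    by_cases h : buf = []
    · simp [h, pvChunks_nil]
    · simp only [List.foldl_nil, List.filter_nil, List.append_nil]
      rw [pvChunks_short buf (by omega) h]
      simp [h]
  | cons c cs ih =>
    by_cases hd : PySem.Chars.isdigit c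
    · by_cases hfull : (buf ++ [c]).length = 10
      · simp only [List.foldl_cons, hd, if_true, hfull, List.filter_cons]
        rw [ih (acc ++ pvLine (buf ++ [c])) [] (by norm_num)]
        have he : buf ++ c :: cs.filter PySem.Chars.isdigit
            = (buf ++ [c]) ++ cs.filter PySem.Chars.isdigit := by simp
        rw [he, pvChunks_full (buf ++ [c]) _ hfull, List.append_assoc]
        simp
      · have hlen : (buf ++ [c]).length < 10 := by
          simp only [List.length_append, List.length_cons, List.length_nil] at hfull ⊢
          omega
        simp only [List.foldl_cons, hd, if_true, hfull, if_false, List.filter_cons]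
        rw [ih acc (buf ++ [c]) hlen]
        simp
    · simp only [List.foldl_cons, hd, Bool.false_eq_true, if_false, List.filter_cons]
      exact ih acc buf hbuf

-- ===== VERDICT (by name: the statement is the Claim_ definition above) =====
theorem procesar_contenido_spec : Claim_equal_procesar_contenido := by
  unfold Claim_equal_procesar_contenido Spec_procesar_contenido
  intro contenido _
  unfold procesar_contenido procesar_contenido_alt
  have hfilt : contenido.toList.foldl
      (fun acc c => if PySem.Chars.isdigit c then acc ++ [c] else acc) ([] : List Char)
      = contenido.toList.filter PySem.Chars.isdigit := by
    simpa using PySem.List.foldl_append_if PySem.Chars.isdigit id contenido.toList []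
  have hA := pvA_fold (contenido.toList.filter PySem.Chars.isdigit).length
      (contenido.toList.filter PySem.Chars.isdigit) 0 (by omega) []
  have hB := pvB_fold contenido.toList [] [] (by norm_num)
  simp only [Nat.cast_zero, List.drop_zero, List.nil_append] at hA hB
  simp only [hfilt, hA, hB]
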